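-- pv_equiv track=rewrite | github.com/Dr-HL/ucsd_code | code_chal_5.py | generate_count_dict
-- ===== SOURCE A (Python) =====
-- def generate_count_dict(text, start, end, k):
--     count = {}
--     for j in range(start, end):
--         kmer = text[j:j+k]
--         if kmer not in count:
--             count[kmer] = 0
--         count[kmer] += 1
--     return count
-- ===== SOURCE B (Python) =====
-- def generate_count_dict(text, start, end, k):
--     # Sort-then-group: collect every k-mer slice once, sort, run-length the
--     # sorted list to get each k-mer's count, then emit the dict in first-
--     # occurrence order (duplicates overwrite with the same value).
--     kmers = [text[j:j+k] for j in range(start, end)]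
--     skmers = sorted(kmers)
--     counts = {}
--     n = len(skmers)
--     i = 0
--     while i < n:
--         j = i + 1
--         while j < n and skmers[j] == skmers[i]:
--             j += 1
--         counts[skmers[i]] = j - i
--         i = j
--     return {km: counts[km] for km in kmers}
-- ===== Notes on version B (the rewrite author's own statement) =====
-- stated objective: alternative
-- what changed: Replaces the running-counter dict (membership test, init-to-0, increment per element) with sort-then-group: slice all k-mers once, sort them, run-length the sorted list into per-kmer counts, then build the result dict in first-occurrence order by one lookup comprehension.
import Mathlib
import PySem

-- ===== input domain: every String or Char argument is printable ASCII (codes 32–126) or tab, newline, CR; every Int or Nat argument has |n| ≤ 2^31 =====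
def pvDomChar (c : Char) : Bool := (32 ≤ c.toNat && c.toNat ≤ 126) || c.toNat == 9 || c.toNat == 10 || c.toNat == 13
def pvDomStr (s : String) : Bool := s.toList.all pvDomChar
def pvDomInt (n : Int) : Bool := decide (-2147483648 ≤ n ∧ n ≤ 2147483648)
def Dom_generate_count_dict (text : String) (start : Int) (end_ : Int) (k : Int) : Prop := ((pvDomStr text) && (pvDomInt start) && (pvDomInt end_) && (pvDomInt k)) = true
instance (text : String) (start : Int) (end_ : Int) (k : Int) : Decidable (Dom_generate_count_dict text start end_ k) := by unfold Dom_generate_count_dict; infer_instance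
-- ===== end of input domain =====

-- B replaces A's running-counter dict with sort-then-group (slice all k-mers, sort, run-length the
-- sorted list into counts, emit in first-occurrence order); alternative algorithm, not claimed faster.
-- ===== PORT A =====
def generate_count_dict (text : String) (start : Int) (end_ : Int) (k : Int) : List (String × Int) :=
  ((PySem.List.pyRange start end_ 1).foldl
    (fun count j =>
      let kmer := PySem.Str.slice text (some j) (some (j + k))
      let count := if count.contains kmer then count else count.insert kmer 0
      count.insert kmer (count.getD kmer 0 + 1))
    PySem.Dict.empty).items

-- ===== PORT B =====
-- Source B's while-loop over the sorted list, as the obvious structural recursion on the same state: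
-- the inner 'while skmers[j] == skmers[i]' is the takeWhile/dropWhile split of the rest,
-- 'counts[skmers[i]] = j - i' stores the run length (takeWhile length + 1).
def countRuns : List String → PySem.Dict String Int → PySem.Dict String Int
  | [], counts => counts
  | x :: rest, counts =>
      countRuns (rest.dropWhile (fun y => y == x))
        (counts.insert x (((rest.takeWhile (fun y => y == x)).length : Int) + 1))
termination_by l _ => l.length
decreasing_by
  simp only [List.length_cons]
  exact Nat.lt_succ_of_le (List.length_dropWhile_le _ _)

def generate_count_dict_alt (text : String) (start : Int) (end_ : Int) (k : Int) : List (String × Int) :=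
  let kmers := (PySem.List.pyRange start end_ 1).map
    (fun j => PySem.Str.slice text (some j) (some (j + k)))
  -- sorted(kmers): ported as Lean's stable mergeSort on String's (Python-exact) lexicographic ≤
  let skmers := kmers.mergeSort (fun a b => decide (a ≤ b))
  let counts := countRuns skmers PySem.Dict.empty
  -- counts[km]: the key is always present (km ∈ kmers, a permutation of skmers), so getD is exact here
  (kmers.foldl (fun d km => d.insert km (counts.getD km 0)) PySem.Dict.empty).items

-- ===== PRECONDITION & SPEC =====
def Spec_generate_count_dict (text : String) (start : Int) (end_ : Int) (k : Int) (out : List (String × Int)) : Prop := out = generate_count_dict_alt text start end_ k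
instance (text : String) (start : Int) (end_ : Int) (k : Int) (out : List (String × Int)) : Decidable (Spec_generate_count_dict text start end_ k out) := by unfold Spec_generate_count_dict; infer_instance

-- ===== CLAIM (what is proved, stated in full; the proofs are below) =====
def Claim_equal_generate_count_dict : Prop := ∀ (text : String) (start : Int) (end_ : Int) (k : Int), Dom_generate_count_dict text start end_ k → Spec_generate_count_dict text start end_ k (generate_count_dict text start end_ k)

-- ===== LEMMAS AND PROOFS =====

-- A's loop body equals the plain counter step "insert km (old + 1)".
lemma stepA_eq (d : PySem.Dict String Int) (km : String) :
    (let c := if d.contains km then d else d.insert km 0;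
     c.insert km (c.getD km 0 + 1)) = d.insert km (d.getD km 0 + 1) := by
  by_cases h : d.contains km = true
  · simp [h]
  · rw [if_neg h]
    show (d.insert km 0).insert km ((d.insert km 0).getD km 0 + 1) = _
    rw [PySem.Dict.getD_insert_self, PySem.Dict.insert_insert_self,
        PySem.Dict.getD_of_not_contains d 0 (by simpa using h)]

-- Inserting a value that depends only on the key keeps the dict
-- "first occurrences keyed by v"; invariant carried through B's output fold.
lemma foldl_insert_const (v : String → Int) (xs : List String) :
    ∀ (s : List String),
      (xs.foldl (fun d x => d.insert x (v x))
        (PySem.Dict.mk (s.map (fun kk => (kk, v kk))))).items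
      = (xs.foldl PySem.Set.add s).map (fun kk => (kk, v kk)) := by
  induction xs with
  | nil => intro s; simp
  | cons x t ih =>
    intro s
    by_cases hx : x ∈ s
    · have hc : (PySem.Dict.mk (s.map (fun kk => (kk, v kk)))).contains x = true := by
        rw [PySem.Dict.contains_iff_mem_keys]
        simpa [PySem.Dict.keys] using hx
      have hins : (PySem.Dict.mk (s.map (fun kk => (kk, v kk)))).insert x (v x)
          = PySem.Dict.mk (s.map (fun kk => (kk, v kk))) := by
        apply PySem.Dict.ext
        rw [PySem.Dict.items_insert_of_contains _ _ hc]
        simp only [List.map_map]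
        apply List.map_congr_left
        intro kk _
        by_cases hk : kk = x <;> simp [hk]
      have hadd : PySem.Set.add s x = s := by
        simp [PySem.Set.add, PySem.Set.contains, hx]
      simp only [List.foldl_cons, hins, hadd, ih s]
    · have hc : (PySem.Dict.mk (s.map (fun kk => (kk, v kk)))).contains x = false := by
        rw [Bool.eq_false_iff, Ne, PySem.Dict.contains_iff_mem_keys]
        simpa [PySem.Dict.keys] using hx
      have hins : (PySem.Dict.mk (s.map (fun kk => (kk, v kk)))).insert x (v x)
          = PySem.Dict.mk ((s ++ [x]).map (fun kk => (kk, v kk))) := by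
        apply PySem.Dict.ext
        rw [PySem.Dict.items_insert_of_not_contains _ _ hc]
        simp
      have hadd : PySem.Set.add s x = s ++ [x] := by
        simp [PySem.Set.add, PySem.Set.contains, hx]
      simp only [List.foldl_cons, hins, hadd, ih (s ++ [x])]

-- Run-length counting of a ≤-sorted list: each key's stored value is its count.
lemma countRuns_get? (l : List String) (d : PySem.Dict String Int)
    (hp : l.Pairwise (· ≤ ·)) (hd : ∀ x ∈ l, d.contains x = false) (km : String) :
    (countRuns l d).get? km = if km ∈ l then some ((l.count km : Nat) : Int) else d.get? km := by
  induction l, d using countRuns.induct with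
  | case1 d => simp [countRuns]
  | case2 x rest d ih =>
    have hxle : ∀ y ∈ rest, x ≤ y := (List.pairwise_cons.mp hp).1
    have hrestp : rest.Pairwise (· ≤ ·) := (List.pairwise_cons.mp hp).2
    have htailp : (rest.dropWhile (fun y => y == x)).Pairwise (· ≤ ·) :=
      hrestp.sublist (List.dropWhile_sublist _)
    have hrunx : ∀ y ∈ rest.takeWhile (fun y => y == x), y = x := by
      intro y hy
      have hb := List.mem_takeWhile_imp hy
      exact eq_of_beq hb
    have hxtail : x ∉ rest.dropWhile (fun y => y == x) := by
      intro hmem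
      have hne : rest.dropWhile (fun y => y == x) ≠ [] := List.ne_nil_of_mem hmem
      obtain ⟨hdv, tl, heq⟩ := List.exists_cons_of_ne_nil hne
      have hhead : (((rest.dropWhile (fun y => y == x)).head hne) == x) = false :=
        List.head_dropWhile_not _ hne
      have hhd : (List.dropWhile (fun y => y == x) rest).head hne = hdv := by
        have h1 := List.head?_eq_some_head (l := List.dropWhile (fun y => y == x) rest) hne
        have h2 : (List.dropWhile (fun y => y == x) rest).head? = some hdv := by rw [heq]; rfl
        exact Option.some.inj (h1.symm.trans h2)
      have hheadne : hdv ≠ x := by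
        rw [hhd] at hhead
        simpa using hhead
      have hheadmem : hdv ∈ rest := by
        apply (List.dropWhile_sublist (fun y => y == x)).subset
        rw [heq]; exact List.mem_cons_self
      have hxh : x ≤ hdv := hxle _ hheadmem
      rw [heq] at hmem
      rcases List.mem_cons.mp hmem with heq' | hmemtl
      · exact hheadne heq'.symm
      · have hhx : hdv ≤ x := by
          rw [heq] at htailp
          exact (List.pairwise_cons.mp htailp).1 x hmemtl
        exact hheadne (le_antisymm hhx hxh)
    have hrest_eq : rest.takeWhile (fun y => y == x) ++ rest.dropWhile (fun y => y == x) = rest :=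
      List.takeWhile_append_dropWhile
    have hd' : ∀ y ∈ rest.dropWhile (fun y => y == x),
        (d.insert x (((rest.takeWhile (fun y => y == x)).length : Int) + 1)).contains y = false := by
      intro y hy
      rw [PySem.Dict.contains_insert]
      have hyx : y ≠ x := fun h => hxtail (h ▸ hy)
      have hyrest : y ∈ rest := (List.dropWhile_sublist _).subset hy
      simp [hyx, hd y (List.mem_cons_of_mem _ hyrest)]
    rw [countRuns, ih htailp hd']
    by_cases hkx : km = x
    · subst hkx
      rw [if_neg hxtail, if_pos (List.mem_cons_self), PySem.Dict.get?_insert_self]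
      have hsplit : rest.count km
          = (rest.takeWhile (fun y => y == km)).count km
            + (rest.dropWhile (fun y => y == km)).count km := by
        conv_lhs => rw [← hrest_eq]
        rw [List.count_append]
      have hcount : (km :: rest).count km
          = (rest.takeWhile (fun y => y == km)).length + 1 := by
        rw [List.count_cons_self, hsplit,
            List.count_eq_length.mpr (fun b hb => (hrunx b hb).symm),
            List.count_eq_zero.mpr hxtail]
      rw [hcount]
      push_cast
      ring_nf
    · have hkrun : km ∉ rest.takeWhile (fun y => y == x) := fun h => hkx (hrunx km h)
      by_cases hkt : km ∈ rest.dropWhile (fun y => y == x)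
      · rw [if_pos hkt, if_pos (by
          apply List.mem_cons_of_mem
          rw [← hrest_eq]; exact List.mem_append_right _ hkt)]
        have hsplit : rest.count km
            = (rest.takeWhile (fun y => y == x)).count km
              + (rest.dropWhile (fun y => y == x)).count km := by
          conv_lhs => rw [← hrest_eq]
          rw [List.count_append]
        have : (x :: rest).count km = (rest.dropWhile (fun y => y == x)).count km := by
          simp [hsplit, List.count_eq_zero.mpr hkrun, Ne.symm hkx]
        rw [this]
      · rw [if_neg hkt, if_neg (by
            intro hmem
            rcases List.mem_cons.mp hmem with h | h
            · exact hkx h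
            · rw [← hrest_eq] at h
              rcases List.mem_append.mp h with h | h
              · exact hkrun h
              · exact hkt h),
          PySem.Dict.get?_insert_of_ne _ _ hkx]

-- The two folds over the SAME k-mer list produce the same items.
lemma key_items (kmers : List String) :
    (kmers.foldl (fun d km => d.insert km (d.getD km 0 + 1)) PySem.Dict.empty).items
    = (kmers.foldl (fun d km => d.insert km
        ((countRuns (kmers.mergeSort (fun a b => decide (a ≤ b))) PySem.Dict.empty).getD km 0))
        PySem.Dict.empty).items := by
  rw [PySem.Dict.foldl_insert_getD_add_one_eq_counter, PySem.Dict.items_counter]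
  have h := foldl_insert_const
    (fun km => (countRuns (kmers.mergeSort (fun a b => decide (a ≤ b))) PySem.Dict.empty).getD km 0)
    kmers []
  simp only [List.map_nil] at h
  rw [show (PySem.Dict.mk ([] : List (String × Int))) = PySem.Dict.empty from rfl] at h
  rw [h, ← PySem.Set.ofList_eq_foldl]
  apply List.map_congr_left
  intro km hkm
  have hkmem : km ∈ kmers := (PySem.Set.mem_ofList kmers km).mp hkm
  have hperm : (kmers.mergeSort (fun a b => decide (a ≤ b))).Perm kmers :=
    List.mergeSort_perm kmers _
  have hpair : (kmers.mergeSort (fun a b => decide (a ≤ b))).Pairwise (· ≤ ·) := by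
    have h := List.pairwise_mergeSort (le := fun a b : String => decide (a ≤ b))
      (by intro a b c hab hbc; simp at hab hbc ⊢; exact le_trans hab hbc)
      (by intro a b; simp; exact le_total _ _) kmers
    exact h.imp (by simp)
  have hget := countRuns_get? (kmers.mergeSort (fun a b => decide (a ≤ b))) PySem.Dict.empty
    hpair (fun x _ => PySem.Dict.contains_empty x) km
  rw [if_pos (hperm.mem_iff.mpr hkmem), hperm.count_eq] at hget
  rw [PySem.Dict.getD_eq_get?_getD, hget]
  rfl

lemma main_eq (text : String) (start : Int) (end_ : Int) (k : Int) :
    generate_count_dict text start end_ k = generate_count_dict_alt text start end_ k := by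
  unfold generate_count_dict generate_count_dict_alt
  have hstep : (fun (count : PySem.Dict String Int) (j : Int) =>
      let kmer := PySem.Str.slice text (some j) (some (j + k))
      let count := if count.contains kmer then count else count.insert kmer 0
      count.insert kmer (count.getD kmer 0 + 1))
    = fun count j => count.insert (PySem.Str.slice text (some j) (some (j + k)))
        (count.getD (PySem.Str.slice text (some j) (some (j + k))) 0 + 1) :=
    funext fun c => funext fun j => stepA_eq c _
  rw [hstep,
      ← List.foldl_map (f := fun j => PySem.Str.slice text (some j) (some (j + k)))
        (g := fun (d : PySem.Dict String Int) km => d.insert km (d.getD km 0 + 1))]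
  exact key_items _

-- ===== VERDICT (by name: the statement is the Claim_ definition above) =====
theorem generate_count_dict_spec : Claim_equal_generate_count_dict :=
  fun text start end_ k _ => main_eq text start end_ k
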